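-- pv_equiv track=rewrite | github.com/ECEtushar/DataStructrures_Algo | Recursion/reverseStack.py | insHead
-- ===== SOURCE A (Python) =====
-- def insHead(st,e):
--     if st == []:
--         st.append(e)
--         return st
--     x= st.pop()
--     insHead(st,e)
--     st.append(x)
--     return st
-- ===== SOURCE B (Python) =====
-- def insHead(st, e):
--     st.insert(0, e)
--     return st
-- ===== Notes on version B (the rewrite author's own statement) =====
-- stated objective: idiomatic
-- what changed: Replaces the recursive pop/recurse/append unwinding with a single positional insert at index 0 (same in-place mutation, same returned list).
import Mathlib
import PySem

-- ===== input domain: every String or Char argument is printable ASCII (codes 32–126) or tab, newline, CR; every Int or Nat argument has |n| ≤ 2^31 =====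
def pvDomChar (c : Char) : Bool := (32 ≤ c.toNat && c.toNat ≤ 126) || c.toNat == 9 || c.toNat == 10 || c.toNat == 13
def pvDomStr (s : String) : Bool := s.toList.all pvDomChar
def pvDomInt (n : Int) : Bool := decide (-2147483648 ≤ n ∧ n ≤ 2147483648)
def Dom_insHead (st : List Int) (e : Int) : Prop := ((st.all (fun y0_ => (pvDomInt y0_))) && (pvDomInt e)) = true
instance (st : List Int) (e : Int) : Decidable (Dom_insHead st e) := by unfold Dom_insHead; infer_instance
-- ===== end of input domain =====

-- B replaces A's recursive pop/recurse/append unwinding with one positional insert at index 0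
-- (objective: idiomatic). Both Pythons mutate st in place the same way; the theorems here are
-- about the returned value.

-- ===== PORT A =====
-- A: if st == []: append e; else pop last x, recurse, append x back.
def insHead (st : List Int) (e : Int) : List Int :=
  if h : st = [] then [e]
  else
    let x := st.getLast h          -- x = st.pop()
    insHead st.dropLast e ++ [x]   -- recurse on the popped stack, then st.append(x)
termination_by st.length
decreasing_by
  simp only [List.length_dropLast]
  exact Nat.sub_lt (List.length_pos_iff.mpr h) Nat.one_pos

-- ===== PORT B =====
-- B: st.insert(0, e); return st  — inserting at index 0 is consing e on front.
def insHead_alt (st : List Int) (e : Int) : List Int := e :: st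

-- ===== PRECONDITION & SPEC =====
def Spec_insHead (st : List Int) (e : Int) (out : List Int) : Prop := out = insHead_alt st e
instance (st : List Int) (e : Int) (out : List Int) : Decidable (Spec_insHead st e out) := by unfold Spec_insHead; infer_instance

-- ===== CLAIM (what is proved, stated in full; the proofs are below) =====
def Claim_equal_insHead : Prop := ∀ (st : List Int) (e : Int), Dom_insHead st e → Spec_insHead st e (insHead st e)

-- ===== LEMMAS AND PROOFS =====
theorem insHead_eq_cons (st : List Int) (e : Int) : insHead st e = e :: st := by
  induction st using List.reverseRecOn with
  | nil => simp [insHead]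
  | append_singleton xs x ih =>
      rw [insHead]
      simp [ih]

-- ===== VERDICT (by name: the statement is the Claim_ definition above) =====
theorem insHead_spec : Claim_equal_insHead := by
  intro st e _
  unfold Spec_insHead insHead_alt
  exact insHead_eq_cons st e
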